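-- pv_equiv track=rewrite | github.com/kartoza/tomorrownow_gap_platform | django_project/gap/utils/reader.py | _get_chunk_indices
-- ===== SOURCE A (Python) =====
-- def _get_chunk_indices(chunks):
--     indices = []
--     start = 0
--     for size in chunks:
--         stop = start + size
--         indices.append((start, stop))
--         start = stop
--     return indices
-- ===== SOURCE B (Python) =====
-- def _get_chunk_indices(chunks):
--     n = len(chunks)
--     if n == 0:
--         return []
--     if n == 1:
--         return [(0, chunks[0])]
--     mid = n // 2
--     left = _get_chunk_indices(chunks[:mid])
--     right = _get_chunk_indices(chunks[mid:])
--     offset = left[-1][1]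
--     return left + [(a + offset, b + offset) for (a, b) in right]
-- ===== Notes on version B (the rewrite author's own statement) =====
-- stated objective: alternative
-- what changed: Replaces the single-pass running-start accumulator loop with a divide-and-conquer recursion: split the chunk list in half, solve each half independently, and shift the right half's pairs by the left half's final stop offset.
import Mathlib
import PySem

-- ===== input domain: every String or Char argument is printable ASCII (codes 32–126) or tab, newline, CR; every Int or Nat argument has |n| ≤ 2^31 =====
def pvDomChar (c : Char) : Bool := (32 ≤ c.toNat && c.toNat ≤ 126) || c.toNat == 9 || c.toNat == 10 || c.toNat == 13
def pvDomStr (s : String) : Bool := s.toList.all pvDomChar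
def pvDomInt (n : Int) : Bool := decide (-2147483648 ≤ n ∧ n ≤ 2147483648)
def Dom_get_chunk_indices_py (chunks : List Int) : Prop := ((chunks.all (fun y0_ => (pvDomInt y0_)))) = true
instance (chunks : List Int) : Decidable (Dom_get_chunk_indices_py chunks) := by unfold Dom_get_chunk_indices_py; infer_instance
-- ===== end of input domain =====

-- B replaces A's running-start accumulator loop by a divide-and-conquer recursion
-- (solve each half, shift the right half by the left half's final stop); objective: alternative algorithm.

-- ===== PORT A =====
-- A: indices = []; start = 0; for size in chunks: stop = start + size; append (start, stop); start = stop
def get_chunk_indices_py (chunks : List Int) : List (Int × Int) :=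
  (chunks.foldl
    (fun (st : List (Int × Int) × Int) size =>
      let stop := st.2 + size
      (st.1 ++ [(st.2, stop)], stop))
    ([], 0)).1

-- ===== PORT B =====
-- B: if n==0 -> []; if n==1 -> [(0, chunks[0])]; else recurse on the two halves and
-- shift the right half's pairs by offset = left[-1][1] (left is nonempty since mid >= 1;
-- getLastD's default is the dead branch of that list access). The recursion is run on a
-- fuel counter initialised to the list length, a guard that only makes it total.
def altGo : Nat → List Int → List (Int × Int)
  | _, [] => []
  | _, [c] => [(0, c)]
  | 0, _ :: _ :: _ => []
  | Nat.succ fuel, x :: y :: rest =>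
      let xs := x :: y :: rest
      let mid := xs.length / 2
      let left := altGo fuel (xs.take mid)
      let right := altGo fuel (xs.drop mid)
      let offset := (left.getLastD (0, 0)).2
      left ++ right.map (fun p => (p.1 + offset, p.2 + offset))

def get_chunk_indices_py_alt (chunks : List Int) : List (Int × Int) :=
  altGo chunks.length chunks

-- ===== PRECONDITION & SPEC =====
def Spec_get_chunk_indices_py (chunks : List Int) (out : List (Int × Int)) : Prop := out = get_chunk_indices_py_alt chunks
instance (chunks : List Int) (out : List (Int × Int)) : Decidable (Spec_get_chunk_indices_py chunks out) := by unfold Spec_get_chunk_indices_py; infer_instance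

-- ===== CLAIM (what is proved, stated in full; the proofs are below) =====
def Claim_equal_get_chunk_indices_py : Prop := ∀ (chunks : List Int), Dom_get_chunk_indices_py chunks → Spec_get_chunk_indices_py chunks (get_chunk_indices_py chunks)

-- ===== LEMMAS AND PROOFS =====

-- canonical description of the result, starting at offset s
def chunkGo (s : Int) : List Int → List (Int × Int)
  | [] => []
  | c :: t => (s, s + c) :: chunkGo (s + c) t

lemma foldl_eq_chunkGo (chunks : List Int) (s : Int) (acc : List (Int × Int)) :
    (chunks.foldl
      (fun (st : List (Int × Int) × Int) size =>
        (st.1 ++ [(st.2, st.2 + size)], st.2 + size))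
      (acc, s)).1 = acc ++ chunkGo s chunks := by
  induction chunks generalizing s acc with
  | nil => simp [chunkGo]
  | cons c t ih => simp [List.foldl, chunkGo, ih (s + c) (acc ++ [(s, s + c)])]

lemma chunkGo_append (xs ys : List Int) (s : Int) :
    chunkGo s (xs ++ ys) = chunkGo s xs ++ chunkGo (s + xs.sum) ys := by
  induction xs generalizing s with
  | nil => simp [chunkGo]
  | cons c t ih => simp [chunkGo, ih (s + c), add_assoc]

lemma chunkGo_shift (xs : List Int) (s : Int) :
    chunkGo s xs = (chunkGo 0 xs).map (fun p => (p.1 + s, p.2 + s)) := by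
  induction xs generalizing s with
  | nil => simp [chunkGo]
  | cons c t ih =>
    simp only [chunkGo, List.map_cons, zero_add]
    refine congrArg₂ _ (by simp [add_comm]) ?_
    rw [ih (s + c), ih c, List.map_map]
    refine List.map_congr_left fun p _ => ?_
    simp; constructor <;> ring

lemma chunkGo_getLastD (xs : List Int) (s : Int) (h : xs ≠ []) :
    ((chunkGo s xs).getLastD (0, 0)).2 = s + xs.sum := by
  induction xs generalizing s with
  | nil => simp at h
  | cons c t ih =>
    cases t with
    | nil => simp [chunkGo]
    | cons d u =>
      have := ih (s + c) (by simp)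
      simp only [chunkGo, List.getLastD_cons] at this ⊢
      rw [this]
      simp only [List.sum_cons]
      ring

lemma altGo_eq_chunkGo : ∀ (fuel : Nat) (xs : List Int), xs.length ≤ fuel + 1 →
    altGo fuel xs = chunkGo 0 xs := by
  intro fuel
  induction fuel with
  | zero =>
    intro xs h
    match xs, h with
    | [], _ => simp [altGo, chunkGo]
    | [c], _ => simp [altGo, chunkGo]
  | succ n ih =>
    intro xs h
    match xs with
    | [] => simp [altGo, chunkGo]
    | [c] => simp [altGo, chunkGo]
    | x :: y :: rest =>
      set xs := x :: y :: rest with hxs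
      have hlen : 2 ≤ xs.length := by simp [hxs]
      have hm : 1 ≤ xs.length / 2 := by omega
      have hm2 : xs.length / 2 < xs.length := by omega
      show (let mid := xs.length / 2
            let left := altGo n (xs.take mid)
            let right := altGo n (xs.drop mid)
            let offset := (left.getLastD (0, 0)).2
            left ++ right.map (fun p => (p.1 + offset, p.2 + offset))) = chunkGo 0 xs
      simp only
      rw [ih (xs.take (xs.length / 2)) (by simp only [List.length_take]; omega),
          ih (xs.drop (xs.length / 2)) (by simp only [List.length_drop]; omega)]
      have htake : xs.take (xs.length / 2) ≠ [] := by
        intro hc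
        rcases List.take_eq_nil_iff.mp hc with h' | h'
        · omega
        · simp [h'] at hlen
      rw [chunkGo_getLastD _ _ htake]
      have hsplit := chunkGo_append (xs.take (xs.length / 2)) (xs.drop (xs.length / 2)) 0
      rw [List.take_append_drop] at hsplit
      rw [hsplit, chunkGo_shift (xs.drop (xs.length / 2)) (0 + (xs.take (xs.length / 2)).sum)]

-- ===== VERDICT (by name: the statement is the Claim_ definition above) =====
theorem get_chunk_indices_py_spec : Claim_equal_get_chunk_indices_py := by
  intro chunks _
  unfold Spec_get_chunk_indices_py get_chunk_indices_py
  unfold get_chunk_indices_py_alt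
  rw [altGo_eq_chunkGo chunks.length chunks (by omega)]
  simpa using foldl_eq_chunkGo chunks 0 []
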